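-- pv_equiv track=rewrite | github.com/Tay-Cheeks/WTC-cs50-git | pset2/plates/plates.py | validate_plate
-- ===== SOURCE A (Python) =====
-- def validate_plate(vanity_input): #function to validate the vanity plate input
--     #check if len is between 3 and 6 characters
--     #we will use 'not' so we dont loop in too many times
--     if not (3 <= len(vanity_input) <= 6):
--         return False
--     #if it starts with 2 letters
--     if not (vanity_input[0].isalpha() and vanity_input[1].isalpha()): #index 0 and 1 must be letters
--         return False
--     #check if all chars are alphanumeric(also rules out punctuation and special characters)
--     if not vanity_input.isalnum():
--         return False
--
--    #find the 1st digit in the string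
--     first_digit_index = None #no digit is found for now, so we set it to none
--     for i, char in enumerate(vanity_input):
--         if char.isdigit():
--             first_digit_index = i #if the char is a digit, we store the index of the digit where it is found in the string HERE(in the variablee)
--             break #stop looping once we found 1st digit and its index
--
--     if first_digit_index is not None: #if we found a 1st digit
--             #check if that first digit is '0' in the input
--         if vanity_input[first_digit_index] == "0": # if the first digit is 0
--             return False
--         #if it has to end with a number then whatever char that comes after the first digit must also be a digit
--         if not vanity_input[first_digit_index: ].isdigit(): #if next char after the first digit is not a digit
--             return False
--
--     return True #otherwise return True if all conditions are met
-- ===== SOURCE B (Python) =====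
-- def validate_plate(vanity_input):
--     if not (3 <= len(vanity_input) <= 6):
--         return False
--     if not (vanity_input[0].isalpha() and vanity_input[1].isalpha()):
--         return False
--     if not vanity_input.isalnum():
--         return False
--     seen_digit = False
--     for char in vanity_input:
--         if char.isdigit():
--             if not seen_digit and char == "0":
--                 return False
--             seen_digit = True
--         elif seen_digit:
--             return False
--     return True
-- ===== Notes on version B (the rewrite author's own statement) =====
-- stated objective: simpler
-- what changed: Replaces the two-phase tail logic (enumerate-loop to find the first digit index, then an index lookup and a slice.isdigit() check) with a single pass over the characters carrying a seen_digit flag, with no index arithmetic or slicing.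
import Mathlib
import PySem

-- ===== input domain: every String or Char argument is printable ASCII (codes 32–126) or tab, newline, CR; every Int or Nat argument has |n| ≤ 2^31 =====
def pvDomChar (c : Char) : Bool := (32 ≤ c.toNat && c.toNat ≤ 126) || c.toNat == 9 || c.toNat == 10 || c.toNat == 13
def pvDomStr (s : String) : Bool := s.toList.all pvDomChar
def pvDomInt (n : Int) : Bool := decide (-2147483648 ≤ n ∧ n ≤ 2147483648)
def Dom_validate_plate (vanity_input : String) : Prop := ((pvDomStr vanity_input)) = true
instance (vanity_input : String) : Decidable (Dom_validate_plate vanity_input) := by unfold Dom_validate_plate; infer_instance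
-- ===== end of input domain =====

-- B replaces A's two-phase tail logic (find-first-digit index loop, then index lookup and slice.isdigit())
-- with a single pass carrying a seen_digit flag; objective: simpler.


-- ===== PORT A =====
-- the 'for i, char in enumerate(...): if char.isdigit(): ...; break' loop
def findFirstDigit : List Char → Option Nat
  | [] => none
  | c :: rest =>
    if PySem.Chars.isdigit c then some 0
    else (findFirstDigit rest).map (· + 1)

def validate_plate (vanity_input : String) : Bool :=
  let cs := vanity_input.toList
  if ¬ (3 ≤ cs.length ∧ cs.length ≤ 6) then false
  else if ¬ (PySem.Chars.isalpha (PySem.List.pyGetD cs 0 ' ')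
             && PySem.Chars.isalpha (PySem.List.pyGetD cs 1 ' ')) then false
  else if ¬ PySem.Chars.strIsalnum cs then false
  else
    match findFirstDigit cs with
    | none => true
    | some i =>
      if PySem.List.pyGetD cs (i : Int) ' ' == '0' then false
      else if ¬ PySem.Chars.strIsdigit (PySem.List.slice cs (some (i : Int)) none) then false
      else true

-- ===== PORT B =====
-- the single-pass 'for char in vanity_input' loop with the seen_digit flag
def scanDigits : Bool → List Char → Bool
  | _, [] => true
  | seen, c :: rest =>
    if PySem.Chars.isdigit c then
      if !seen && c == '0' then false else scanDigits true rest
    else if seen then false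
    else scanDigits seen rest

def validate_plate_alt (vanity_input : String) : Bool :=
  let cs := vanity_input.toList
  if ¬ (3 ≤ cs.length ∧ cs.length ≤ 6) then false
  else if ¬ (PySem.Chars.isalpha (PySem.List.pyGetD cs 0 ' ')
             && PySem.Chars.isalpha (PySem.List.pyGetD cs 1 ' ')) then false
  else if ¬ PySem.Chars.strIsalnum cs then false
  else scanDigits false cs

-- ===== PRECONDITION & SPEC =====
def Spec_validate_plate (vanity_input : String) (out : Bool) : Prop := out = validate_plate_alt vanity_input
instance (vanity_input : String) (out : Bool) : Decidable (Spec_validate_plate vanity_input out) := by unfold Spec_validate_plate; infer_instance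

-- ===== CLAIM (what is proved, stated in full; the proofs are below) =====
def Claim_equal_validate_plate : Prop := ∀ (vanity_input : String), Dom_validate_plate vanity_input → Spec_validate_plate vanity_input (validate_plate vanity_input)

-- ===== LEMMAS AND PROOFS =====

-- after the first digit is seen, B's scan just checks that every remaining char is a digit
lemma scanDigits_true (cs : List Char) :
    scanDigits true cs = cs.all PySem.Chars.isdigit := by
  induction cs with
  | nil => rfl
  | cons c rest ih =>
    simp only [scanDigits, List.all_cons]
    by_cases h : PySem.Chars.isdigit c = true <;> simp [h, ih]

-- B's scan from the unset flag computes exactly A's two-phase tail check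
lemma scanDigits_false (cs : List Char) :
    scanDigits false cs =
      (match findFirstDigit cs with
       | none => true
       | some i =>
         if cs.getD i ' ' == '0' then false
         else if ¬ PySem.Chars.strIsdigit (cs.drop i) then false
         else true) := by
  induction cs with
  | nil => rfl
  | cons c rest ih =>
    by_cases h : PySem.Chars.isdigit c = true
    · simp only [scanDigits, findFirstDigit, h, if_pos, Bool.not_false, Bool.true_and,
        List.getD_cons_zero, List.drop_zero]
      by_cases h0 : (c == '0') = true
      · simp [h0]
      · simp only [h0, if_false, Bool.false_eq_true]
        rw [scanDigits_true]
        simp only [PySem.Chars.strIsdigit, List.isEmpty_cons, Bool.not_false, Bool.true_and,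
          List.all_cons, h]
        cases rest.all PySem.Chars.isdigit <;> simp
    · simp only [scanDigits, findFirstDigit, h, Bool.false_eq_true, if_false, ih]
      cases hf : findFirstDigit rest with
      | none => simp
      | some i => simp [List.drop_succ_cons]

theorem validate_plate_equal (s : String) :
    validate_plate s = validate_plate_alt s := by
  unfold validate_plate validate_plate_alt
  dsimp only
  split_ifs with h1 h2 h3
  all_goals try rfl
  rw [scanDigits_false]
  cases hf : findFirstDigit s.toList with
  | none => rfl
  | some i =>
    simp only [PySem.List.pyGetD_natCast, PySem.List.slice_from_natCast]

-- ===== VERDICT (by name: the statement is the Claim_ definition above) =====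
theorem validate_plate_spec : Claim_equal_validate_plate := by
  intro s _
  exact validate_plate_equal s
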